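-- pv_equiv track=rewrite | github.com/r2dt-bio/R2DT | utils/stockholm.py | repair_secondary_structure
-- ===== SOURCE A (Python) =====
-- def repair_secondary_structure(structure: str) -> tuple[str, list[str]]:
--     """
--     Attempt to repair a secondary structure with unbalanced brackets.
--
--     Strategy:
--     - Unmatched ')' with no corresponding '(' → convert to '.'
--     - Unmatched '(' with no corresponding ')' → convert to '.'
--     - Same logic applies to other bracket types and pseudoknot notation
--
--     Args:
--         structure: Secondary structure in dot-bracket notation
--
--     Returns:
--         Tuple of (repaired_structure, list_of_repairs_made)
--     """
--     repairs = []
--     struct_list = list(structure)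
--
--     # Define bracket pairs to check
--     bracket_pairs = [
--         ("(", ")"),
--         ("[", "]"),
--         ("{", "}"),
--         ("<", ">"),
--     ]
--
--     # Add letter pairs for pseudoknot notation
--     for letter in "ABCDEFGHIJKLMNOPQRSTUVWXYZ":
--         if letter in structure or letter.lower() in structure:
--             bracket_pairs.append((letter, letter.lower()))
--
--     for open_b, close_b in bracket_pairs:
--         # First pass: fix unmatched close brackets
--         stack = []
--         for i, c in enumerate(struct_list):
--             if c == open_b:
--                 stack.append(i)
--             elif c == close_b:
--                 if not stack:
--                     # Unmatched close bracket - convert to dot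
--                     struct_list[i] = "."
--                     repairs.append(
--                         f"Position {i+1}: '{close_b}' → '.' (no matching '{open_b}')"
--                     )
--                 else:
--                     stack.pop()
--
--         # Second pass: fix unmatched open brackets (remaining in stack)
--         for pos in stack:
--             struct_list[pos] = "."
--             repairs.append(
--                 f"Position {pos+1}: '{open_b}' → '.' (no matching '{close_b}')"
--             )
--
--     return "".join(struct_list), repairs
-- ===== SOURCE B (Python) =====
-- def repair_secondary_structure(structure: str) -> tuple[str, list[str]]:
--     """Single left-to-right pass with per-bracket-type stacks and repair buckets."""
--     pairs = [("(", ")"), ("[", "]"), ("{", "}"), ("<", ">")]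
--     for letter in "ABCDEFGHIJKLMNOPQRSTUVWXYZ":
--         if letter in structure or letter.lower() in structure:
--             pairs.append((letter, letter.lower()))
--
--     kind = {}
--     for t, (open_b, close_b) in enumerate(pairs):
--         kind[open_b] = (t, True)
--         kind[close_b] = (t, False)
--
--     stacks = [[] for _ in pairs]
--     closes = [[] for _ in pairs]
--     chars = list(structure)
--
--     for i, c in enumerate(chars):
--         hit = kind.get(c)
--         if hit is None:
--             continue
--         t, is_open = hit
--         if is_open:
--             stacks[t].append(i)
--         elif stacks[t]:
--             stacks[t].pop()
--         else:
--             closes[t].append(i)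
--             chars[i] = "."
--
--     repairs = []
--     for (open_b, close_b), stk, cls in zip(pairs, stacks, closes):
--         for i in cls:
--             repairs.append(f"Position {i+1}: '{close_b}' → '.' (no matching '{open_b}')")
--         for i in stk:
--             chars[i] = "."
--             repairs.append(f"Position {i+1}: '{open_b}' → '.' (no matching '{close_b}')")
--
--     return "".join(chars), repairs
-- ===== Notes on version B (the rewrite author's own statement) =====
-- stated objective: faster
-- what changed: A rescans the whole structure once per bracket type (4 fixed + active letter pairs), mutating the list between passes; B makes one left-to-right pass with a char->(type,is_open) dict and per-type stacks/close-buckets, then assembles the repairs grouped per type in A's canonical order.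
import Mathlib
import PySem

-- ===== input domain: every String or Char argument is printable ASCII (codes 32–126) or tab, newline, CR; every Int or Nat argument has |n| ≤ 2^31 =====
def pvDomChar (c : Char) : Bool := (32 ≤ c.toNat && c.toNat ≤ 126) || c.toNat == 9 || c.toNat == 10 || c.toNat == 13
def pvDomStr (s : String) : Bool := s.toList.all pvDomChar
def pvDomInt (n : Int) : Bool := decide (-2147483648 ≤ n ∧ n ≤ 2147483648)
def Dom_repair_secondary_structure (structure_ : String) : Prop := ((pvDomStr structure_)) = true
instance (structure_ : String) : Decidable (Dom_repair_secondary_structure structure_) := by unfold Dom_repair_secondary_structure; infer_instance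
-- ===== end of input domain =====

-- B replaces A's one-scan-per-bracket-type repair loop by a single left-to-right pass with
-- per-type stacks and repair buckets (objective: faster; one pass instead of one per type).

-- helpers shared by both ports: both Pythons build the bracket-pair list and format
-- the repair messages with identical code, so the ports share these transliterations.
def pvMsgClose (i : Int) (ob cb : Char) : String :=
  "Position " ++ PySem.Int.toStr (i + 1) ++ ": '" ++ String.singleton cb ++
    "' → '.' (no matching '" ++ String.singleton ob ++ "')"

def pvMsgOpen (i : Int) (ob cb : Char) : String :=
  "Position " ++ PySem.Int.toStr (i + 1) ++ ": '" ++ String.singleton ob ++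
    "' → '.' (no matching '" ++ String.singleton cb ++ "')"

-- the 4 fixed pairs plus (letter, letter.lower()) for each letter occurring in the structure
def pvMkPairs (s : List Char) : List (Char × Char) :=
  "ABCDEFGHIJKLMNOPQRSTUVWXYZ".toList.foldl
    (fun acc L =>
      if PySem.Chars.isIn [L] s || PySem.Chars.isIn [PySem.Chars.lowerChar L] s then
        acc ++ [(L, PySem.Chars.lowerChar L)]
      else acc)
    [('(', ')'), ('[', ']'), ('{', '}'), ('<', '>')]

-- ===== PORT A =====
-- A's first pass mutates struct_list only at the index it has just read, so iterating
-- "enumerate(struct_list)" is exactly iterating the enumerate of its snapshot while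
-- threading the mutated list alongside (the write happens after the read at the same index).
def pvStepA (ob cb : Char) (st : List Char × List Int × List String) (ic : Int × Char) :
    List Char × List Int × List String :=
  if ic.2 = ob then (st.1, st.2.1 ++ [ic.1], st.2.2)
  else if ic.2 = cb then
    if st.2.1 = [] then
      (PySem.List.pySetD st.1 ic.1 '.', st.2.1, st.2.2 ++ [pvMsgClose ic.1 ob cb])
    else (st.1, st.2.1.dropLast, st.2.2)
  else st

def pvPassA (acc : List Char × List String) (p : Char × Char) : List Char × List String :=
  let first := (PySem.List.enumerate acc.1).foldl (pvStepA p.1 p.2) (acc.1, [], acc.2)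
  first.2.1.foldl
    (fun (q : List Char × List String) pos =>
      (PySem.List.pySetD q.1 pos '.', q.2 ++ [pvMsgOpen pos p.1 p.2]))
    (first.1, first.2.2)

def repair_secondary_structure (structure_ : String) : String × List String :=
  let res := (pvMkPairs structure_.toList).foldl pvPassA (structure_.toList, [])
  (String.ofList res.1, res.2)

-- ===== PORT B =====
def pvStepB (kind : PySem.Dict Char (Int × Bool))
    (s : List (List Int) × List (List Int) × List Char) (ic : Int × Char) :
    List (List Int) × List (List Int) × List Char :=
  match kind.get? ic.2 with
  | none => s
  | some (t, isOpen) =>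
    if isOpen then
      (PySem.List.pySetD s.1 t (PySem.List.pyGetD s.1 t [] ++ [ic.1]), s.2.1, s.2.2)
    else if PySem.List.pyGetD s.1 t [] ≠ [] then
      (PySem.List.pySetD s.1 t (PySem.List.pyGetD s.1 t []).dropLast, s.2.1, s.2.2)
    else
      (s.1, PySem.List.pySetD s.2.1 t (PySem.List.pyGetD s.2.1 t [] ++ [ic.1]),
        PySem.List.pySetD s.2.2 ic.1 '.')

def pvAsmB (acc : List Char × List String) (e : (Char × Char) × List Int × List Int) :
    List Char × List String :=
  let acc1 := e.2.2.foldl (fun (a : List Char × List String) i =>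
    (a.1, a.2 ++ [pvMsgClose i e.1.1 e.1.2])) acc
  e.2.1.foldl (fun (a : List Char × List String) i =>
    (PySem.List.pySetD a.1 i '.', a.2 ++ [pvMsgOpen i e.1.1 e.1.2])) acc1

-- the body of B's kind-building loop: kind[open_b], kind[close_b] = (t, True), (t, False)
def pvKindStep (d : PySem.Dict Char (Int × Bool)) (tp : Int × Char × Char) :
    PySem.Dict Char (Int × Bool) :=
  (d.insert tp.2.1 (tp.1, true)).insert tp.2.2 (tp.1, false)

def repair_secondary_structure_alt (structure_ : String) : String × List String :=
  let sl := structure_.toList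
  let pairs := pvMkPairs sl
  let kind := (PySem.List.enumerate pairs).foldl pvKindStep PySem.Dict.empty
  let st := (PySem.List.enumerate sl).foldl (pvStepB kind)
    (pairs.map (fun _ => []), pairs.map (fun _ => []), sl)
  let fin := (pairs.zip (st.1.zip st.2.1)).foldl pvAsmB (st.2.2, [])
  (String.ofList fin.1, fin.2)

-- ===== PRECONDITION & SPEC =====
def Spec_repair_secondary_structure (structure_ : String) (out : String × List String) : Prop := out = repair_secondary_structure_alt structure_
instance (structure_ : String) (out : String × List String) : Decidable (Spec_repair_secondary_structure structure_ out) := by unfold Spec_repair_secondary_structure; infer_instance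

-- ===== CLAIM (what is proved, stated in full; the proofs are below) =====
def Claim_equal_repair_secondary_structure : Prop := ∀ (structure_ : String), Dom_repair_secondary_structure structure_ → Spec_repair_secondary_structure structure_ (repair_secondary_structure structure_)

-- ===== LEMMAS AND PROOFS =====

-- dotting a position: struct_list[i] = "."
def pvDot (m : List Char) (i : Int) : List Char := PySem.List.pySetD m i '.'

-- canonical per-bracket-type scan of an enumerated character list:
-- push opens, pop matched closes, record unmatched closes
def pvScan (ob cb : Char) : List (Int × Char) → List Int × List Int → List Int × List Int
  | [], st => st
  | ic :: es, st =>
    pvScan ob cb es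
      (if ic.2 = ob then (st.1 ++ [ic.1], st.2)
       else if ic.2 = cb then
         if st.1 = [] then (st.1, st.2 ++ [ic.1]) else (st.1.dropLast, st.2)
       else st)

def pvStk (s : List Char) (p : Char × Char) : List Int :=
  (pvScan p.1 p.2 (PySem.List.enumerate s) ([], [])).1
def pvCls (s : List Char) (p : Char × Char) : List Int :=
  (pvScan p.1 p.2 (PySem.List.enumerate s) ([], [])).2
def pvMsgs (s : List Char) (p : Char × Char) : List String :=
  (pvCls s p).map (fun i => pvMsgClose i p.1 p.2) ++ (pvStk s p).map (fun i => pvMsgOpen i p.1 p.2)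
def pvChars (ps : List (Char × Char)) : List Char := ps.flatMap (fun p => [p.1, p.2])
def pvFullPairs : List (Char × Char) :=
  [('(', ')'), ('[', ']'), ('{', '}'), ('<', '>')] ++
    "ABCDEFGHIJKLMNOPQRSTUVWXYZ".toList.map (fun L => (L, PySem.Chars.lowerChar L))
def pvScanN (sl : List Char) (n : Nat) (p : Char × Char) : List Int × List Int :=
  pvScan p.1 p.2 ((PySem.List.enumerate sl).take n) ([], [])

theorem pvScan_append (ob cb : Char) (es es' : List (Int × Char)) (st : List Int × List Int) :
    pvScan ob cb (es ++ es') st = pvScan ob cb es' (pvScan ob cb es st) := by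
  induction es generalizing st with
  | nil => rfl
  | cons e es ih => simp [pvScan, ih]

theorem pvScan_snd_acc (ob cb : Char) (es : List (Int × Char)) (stk cls : List Int) :
    pvScan ob cb es (stk, cls)
      = ((pvScan ob cb es (stk, [])).1, cls ++ (pvScan ob cb es (stk, [])).2) := by
  induction es generalizing stk cls with
  | nil => simp [pvScan]
  | cons e es ih =>
    simp only [pvScan]
    split_ifs with h1 h2 h3
    · exact ih _ _
    · rw [ih stk (cls ++ [e.1]), ih stk ([] ++ [e.1])]; simp
    · exact ih _ _
    · exact ih _ _

theorem pvScan_mem_fst (ob cb : Char) (es : List (Int × Char)) (stk cls : List Int) (x : Int)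
    (hx : x ∈ (pvScan ob cb es (stk, cls)).1) : x ∈ stk ∨ (x, ob) ∈ es := by
  induction es generalizing stk cls with
  | nil => simp [pvScan] at hx; exact Or.inl hx
  | cons e es ih =>
    simp only [pvScan] at hx
    split_ifs at hx with h1 h2 h3
    · rcases ih _ _ hx with h | h
      · rcases List.mem_append.1 h with h | h
        · exact Or.inl h
        · right
          simp only [List.mem_singleton] at h
          have he : (x, ob) = e := by cases e; simp_all
          exact he ▸ List.mem_cons_self
      · exact Or.inr (List.mem_cons_of_mem _ h)
    · rcases ih _ _ hx with h | h
      · exact Or.inl h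
      · exact Or.inr (List.mem_cons_of_mem _ h)
    · rcases ih _ _ hx with h | h
      · exact Or.inl ((List.dropLast_sublist _).subset h)
      · exact Or.inr (List.mem_cons_of_mem _ h)
    · rcases ih _ _ hx with h | h
      · exact Or.inl h
      · exact Or.inr (List.mem_cons_of_mem _ h)

theorem pvScan_mem_snd (ob cb : Char) (es : List (Int × Char)) (stk cls : List Int) (x : Int)
    (hx : x ∈ (pvScan ob cb es (stk, cls)).2) : x ∈ cls ∨ (x, cb) ∈ es := by
  induction es generalizing stk cls with
  | nil => simp [pvScan] at hx; exact Or.inl hx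
  | cons e es ih =>
    simp only [pvScan] at hx
    split_ifs at hx with h1 h2 h3
    · rcases ih _ _ hx with h | h
      · exact Or.inl h
      · exact Or.inr (List.mem_cons_of_mem _ h)
    · rcases ih _ _ hx with h | h
      · rcases List.mem_append.1 h with h | h
        · exact Or.inl h
        · right
          simp only [List.mem_singleton] at h
          have he : (x, cb) = e := by cases e; simp_all
          exact he ▸ List.mem_cons_self
      · exact Or.inr (List.mem_cons_of_mem _ h)
    · rcases ih _ _ hx with h | h
      · exact Or.inl h
      · exact Or.inr (List.mem_cons_of_mem _ h)
    · rcases ih _ _ hx with h | h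
      · exact Or.inl h
      · exact Or.inr (List.mem_cons_of_mem _ h)

theorem pvStk_spec (s : List Char) (p : Char × Char) (i : Int) (hi : i ∈ pvStk s p) :
    ∃ k : Nat, ∃ h : k < s.length, i = (k : Int) ∧ s[k] = p.1 := by
  rcases pvScan_mem_fst p.1 p.2 _ [] [] i hi with h | h
  · simp at h
  · rcases (PySem.List.mem_enumerate_iff _ _ _).1 h with ⟨k, hk, he⟩
    have h1 : i = 0 + (k : Int) ∧ p.1 = s[k] := by simpa [Prod.ext_iff] using he
    exact ⟨k, hk, by omega, h1.2.symm⟩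

theorem pvCls_spec (s : List Char) (p : Char × Char) (i : Int) (hi : i ∈ pvCls s p) :
    ∃ k : Nat, ∃ h : k < s.length, i = (k : Int) ∧ s[k] = p.2 := by
  rcases pvScan_mem_snd p.1 p.2 _ [] [] i hi with h | h
  · simp at h
  · rcases (PySem.List.mem_enumerate_iff _ _ _).1 h with ⟨k, hk, he⟩
    have h1 : i = 0 + (k : Int) ∧ p.2 = s[k] := by simpa [Prod.ext_iff] using he
    exact ⟨k, hk, by omega, h1.2.symm⟩

theorem foldl_pvDot_spec (ps : List Int) (m : List Char)
    (hv : ∀ i ∈ ps, 0 ≤ i ∧ i < (m.length : Int)) :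
    (ps.foldl pvDot m).length = m.length ∧
      ∀ j : Nat, ∀ hj : j < m.length,
        (ps.foldl pvDot m)[j]? = some (if (j : Int) ∈ ps then '.' else m[j]) := by
  induction ps generalizing m with
  | nil =>
    refine ⟨rfl, fun j hj => ?_⟩
    simp [List.getElem?_eq_getElem hj]
  | cons i ps ih =>
    have hi := hv i (List.mem_cons_self)
    have hset : pvDot m i = m.set i.toNat '.' := by
      simp [pvDot, PySem.List.pySetD, PySem.List.pySet?, PySem.List.pyIdx?, hi.1, hi.2]
    have hlen : (pvDot m i).length = m.length := by simp [hset]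
    have hv' : ∀ x ∈ ps, 0 ≤ x ∧ x < ((pvDot m i).length : Int) := by
      intro x hx; rw [hlen]; exact hv x (List.mem_cons_of_mem _ hx)
    obtain ⟨hl, hp⟩ := ih (pvDot m i) hv'
    refine ⟨by simpa [hlen] using hl, fun j hj => ?_⟩
    have hj2 : j < (pvDot m i).length := by omega
    rw [List.foldl_cons, hp j hj2]
    by_cases hmem : (j : Int) ∈ ps
    · simp [hmem]
    · simp only [hmem, if_false, List.mem_cons]
      by_cases hji : (j : Int) = i
      · simp [hji, hset, show i.toNat = j by omega]
      · simp [hji, hset, List.getElem_set, show ¬ i.toNat = j by omega]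

theorem pySetD_nat {α : Type} (L : List α) (t : Nat) (v : α) (h : t < L.length) :
    PySem.List.pySetD L (t : Int) v = L.set t v := by
  simp [PySem.List.pySetD, PySem.List.pySet?, PySem.List.pyIdx?, h]

theorem pyGetD_nat {α : Type} (L : List α) (t : Nat) (d : α) (h : t < L.length) :
    PySem.List.pyGetD L (t : Int) d = L[t] := by
  simp [PySem.List.pyGetD_natCast, List.getElem?_eq_getElem h]

theorem fpA_eq (ob cb : Char) (es : List (Int × Char)) (m : List Char) (stk : List Int)
    (rs : List String) :
    es.foldl (pvStepA ob cb) (m, stk, rs)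
      = ((pvScan ob cb es (stk, [])).2.foldl pvDot m,
         (pvScan ob cb es (stk, [])).1,
         rs ++ ((pvScan ob cb es (stk, [])).2).map (fun i => pvMsgClose i ob cb)) := by
  induction es generalizing m stk rs with
  | nil => simp [pvScan]
  | cons e es ih =>
    rw [List.foldl_cons]
    simp only [pvStepA, pvScan]
    split_ifs with h1 h2 h3
    · exact ih m (stk ++ [e.1]) rs
    · rw [h3, ih (PySem.List.pySetD m e.1 '.') [] (rs ++ [pvMsgClose e.1 ob cb]),
        pvScan_snd_acc ob cb es [] ([] ++ [e.1])]
      simp [pvDot]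
    · exact ih m stk.dropLast rs
    · exact ih m stk rs

theorem fpA_congr (ob cb : Char) (es es' : List (Int × Char))
    (st : List Char × List Int × List String) (hlen : es.length = es'.length)
    (h : ∀ k : Nat, ∀ hk : k < es.length, ∀ hk' : k < es'.length,
      es[k].1 = es'[k].1 ∧ (es[k].2 = ob ↔ es'[k].2 = ob) ∧ (es[k].2 = cb ↔ es'[k].2 = cb)) :
    es.foldl (pvStepA ob cb) st = es'.foldl (pvStepA ob cb) st := by
  induction es generalizing es' st with
  | nil => cases es' with
    | nil => rfl
    | cons e es' => simp at hlen
  | cons e es ih =>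
    cases es' with
    | nil => simp at hlen
    | cons e' es' =>
      have h0 := h 0 (by simp) (by simp)
      simp only [List.getElem_cons_zero] at h0
      have htail : ∀ k : Nat, ∀ hk : k < es.length, ∀ hk' : k < es'.length,
          es[k].1 = es'[k].1 ∧ (es[k].2 = ob ↔ es'[k].2 = ob) ∧ (es[k].2 = cb ↔ es'[k].2 = cb) := by
        intro k hk hk'
        simpa using h (k + 1) (by simpa using Nat.succ_lt_succ hk) (by simpa using Nat.succ_lt_succ hk')
      rw [List.foldl_cons, List.foldl_cons]
      have hstep : pvStepA ob cb st e = pvStepA ob cb st e' := by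
        simp only [pvStepA, h0.1]
        by_cases ho : e.2 = ob
        · rw [if_pos ho, if_pos (h0.2.1.1 ho)]
        · rw [if_neg ho, if_neg (fun hc => ho (h0.2.1.2 hc))]
          by_cases hc : e.2 = cb
          · rw [if_pos hc, if_pos (h0.2.2.1 hc)]
          · rw [if_neg hc, if_neg (fun hd => hc (h0.2.2.2 hd))]
      rw [hstep]
      exact ih es' _ (by simpa using hlen) htail

theorem pvPassA_eq (sl m : List Char) (rs : List String) (p : Char × Char)
    (hlen : m.length = sl.length)
    (hpt : ∀ j : Nat, ∀ hj : j < sl.length, ∀ hj' : j < m.length,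
      m[j] = sl[j] ∨ (m[j] = '.' ∧ sl[j] ≠ p.1 ∧ sl[j] ≠ p.2))
    (h1 : p.1 ≠ '.') (h2 : p.2 ≠ '.') :
    pvPassA (m, rs) p
      = ((pvStk sl p).foldl pvDot ((pvCls sl p).foldl pvDot m), rs ++ pvMsgs sl p) := by
  have hcongr : (PySem.List.enumerate m).foldl (pvStepA p.1 p.2) (m, [], rs)
      = (PySem.List.enumerate sl).foldl (pvStepA p.1 p.2) (m, [], rs) := by
    apply fpA_congr
    · simp [hlen]
    · intro k hk hk'
      rw [PySem.List.length_enumerate] at hk hk'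
      rw [PySem.List.getElem_enumerate, PySem.List.getElem_enumerate]
      rcases hpt k (by omega) (by omega) with h | h
      · simp [h]
      · refine ⟨rfl, ?_, ?_⟩
        · exact ⟨fun hx => absurd (h.1.symm.trans hx).symm h1, fun hx => absurd hx h.2.1⟩
        · exact ⟨fun hx => absurd (h.1.symm.trans hx).symm h2, fun hx => absurd hx h.2.2⟩
  unfold pvPassA
  rw [hcongr, fpA_eq]
  have hsecond : ∀ (stk : List Int) (l1 : List Char) (rs1 : List String),
      stk.foldl (fun (q : List Char × List String) pos =>
        (PySem.List.pySetD q.1 pos '.', q.2 ++ [pvMsgOpen pos p.1 p.2])) (l1, rs1)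
      = (stk.foldl pvDot l1, rs1 ++ stk.map (fun i => pvMsgOpen i p.1 p.2)) := by
    intro stk l1 rs1
    rw [PySem.List.foldl_prod_mk (f := fun a pos => PySem.List.pySetD a pos '.')
      (g := fun r pos => r ++ [pvMsgOpen pos p.1 p.2])]
    rw [PySem.List.foldl_append_singleton_eq_map]
    rfl
  rw [hsecond]
  simp [pvMsgs, pvStk, pvCls]

theorem pvFoldA_eq (sl : List Char) (ps : List (Char × Char)) (m : List Char)
    (rs : List String) (R : List Char)
    (hlen : m.length = sl.length)
    (hpt : ∀ j : Nat, ∀ hj : j < sl.length, ∀ hj' : j < m.length,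
      m[j] = sl[j] ∨ (m[j] = '.' ∧ sl[j] ∈ R))
    (hR : ∀ c ∈ R, c ∉ pvChars ps)
    (hnd : (pvChars ps).Nodup) (hdot : '.' ∉ pvChars ps) :
    ps.foldl pvPassA (m, rs)
      = (ps.foldl (fun mm q => (pvStk sl q).foldl pvDot ((pvCls sl q).foldl pvDot mm)) m,
         rs ++ ps.flatMap (pvMsgs sl)) := by
  induction ps generalizing m rs R with
  | nil => simp
  | cons p ps ih =>
    have hmem1 : p.1 ∈ pvChars (p :: ps) := by simp [pvChars]
    have hmem2 : p.2 ∈ pvChars (p :: ps) := by simp [pvChars]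
    have hd1 : p.1 ≠ '.' := fun h => hdot (h ▸ hmem1)
    have hd2 : p.2 ≠ '.' := fun h => hdot (h ▸ hmem2)
    have hpass := pvPassA_eq sl m rs p hlen
      (fun j hj hj' => by
        rcases hpt j hj hj' with h | h
        · exact Or.inl h
        · exact Or.inr ⟨h.1, fun hx => hR _ (hx ▸ h.2) hmem1, fun hx => hR _ (hx ▸ h.2) hmem2⟩)
      hd1 hd2
    rw [List.foldl_cons, hpass]
    -- validity of the recorded positions
    have hvc : ∀ i ∈ pvCls sl p, 0 ≤ i ∧ i < (m.length : Int) := by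
      intro i hi; rcases pvCls_spec sl p i hi with ⟨k, hk, rfl, _⟩
      constructor <;> omega
    obtain ⟨hlc, hpc⟩ := foldl_pvDot_spec _ m hvc
    have hvs : ∀ i ∈ pvStk sl p, 0 ≤ i ∧ i < (((pvCls sl p).foldl pvDot m).length : Int) := by
      intro i hi; rcases pvStk_spec sl p i hi with ⟨k, hk, rfl, _⟩
      rw [hlc]; constructor <;> omega
    obtain ⟨hls, hps⟩ := foldl_pvDot_spec _ _ hvs
    set m' := (pvStk sl p).foldl pvDot ((pvCls sl p).foldl pvDot m) with hm'
    have hlen' : m'.length = sl.length := by rw [hm', hls, hlc, hlen]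
    have hpt' : ∀ j : Nat, ∀ hj : j < sl.length, ∀ hj' : j < m'.length,
        m'[j] = sl[j] ∨ (m'[j] = '.' ∧ sl[j] ∈ R ++ [p.1, p.2]) := by
      intro j hj hj'
      have hjm : j < m.length := by omega
      have hjc : j < ((pvCls sl p).foldl pvDot m).length := by omega
      have e1 := hps j (by omega)
      have e2 := hpc j hjm
      rw [List.getElem?_eq_getElem hj'] at e1
      rw [List.getElem?_eq_getElem hjc] at e2
      have e1' : m'[j] = if (j : Int) ∈ pvStk sl p then '.'
          else ((pvCls sl p).foldl pvDot m)[j] := by exact Option.some.inj e1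
      have e2' : ((pvCls sl p).foldl pvDot m)[j] = if (j : Int) ∈ pvCls sl p then '.'
          else m[j] := by exact Option.some.inj e2
      by_cases hs : (j : Int) ∈ pvStk sl p
      · rcases pvStk_spec sl p _ hs with ⟨k, hk, hkj, hsl⟩
        have : k = j := by omega
        subst this
        refine Or.inr ⟨by simp [e1', hs], by simp [hsl]⟩
      · by_cases hc : (j : Int) ∈ pvCls sl p
        · rcases pvCls_spec sl p _ hc with ⟨k, hk, hkj, hsl⟩
          have : k = j := by omega
          subst this
          refine Or.inr ⟨by simp [e1', e2', hs, hc], by simp [hsl]⟩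
        · have em : m'[j] = m[j] := by simp [e1', e2', hs, hc]
          rcases hpt j hj hjm with h | h
          · exact Or.inl (em ▸ h)
          · exact Or.inr ⟨em ▸ h.1, by simp [h.2]⟩
    have hchars : pvChars (p :: ps) = p.1 :: p.2 :: pvChars ps := by simp [pvChars]
    have hsub : ∀ c, c ∈ pvChars ps → c ∈ pvChars (p :: ps) := by
      intro c hc; rw [hchars]; exact List.mem_cons_of_mem _ (List.mem_cons_of_mem _ hc)
    have hndt : (pvChars ps).Nodup := by
      rw [hchars] at hnd
      exact (hnd.of_cons).of_cons
    have hR' : ∀ c ∈ R ++ [p.1, p.2], c ∉ pvChars ps := by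
      intro c hcm hcp
      rcases List.mem_append.1 hcm with h | h
      · exact hR c h (hsub c hcp)
      · rw [hchars] at hnd
        rcases List.mem_pair.1 h with rfl | rfl
        · exact (List.nodup_cons.1 hnd).1 (by simp [hcp])
        · exact (List.nodup_cons.1 (List.nodup_cons.1 hnd).2).1 hcp
    have hdott : '.' ∉ pvChars ps := fun h => hdot (hsub _ h)
    rw [ih m' (rs ++ pvMsgs sl p) (R ++ [p.1, p.2]) hlen' hpt' hR' hndt hdott]
    simp [List.flatMap_cons]
    rw [hm']

theorem pvMkPairs_sublist (s : List Char) : List.Sublist (pvMkPairs s) pvFullPairs := by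
  unfold pvMkPairs pvFullPairs
  rw [PySem.List.foldl_append_if]
  exact (List.filter_sublist.map _).append_left _

theorem pvChars_sublist {ps qs : List (Char × Char)} (h : List.Sublist ps qs) :
    List.Sublist (pvChars ps) (pvChars qs) := by
  induction h with
  | slnil => exact List.Sublist.refl _
  | cons q h ih =>
    refine ih.trans ?_
    simp only [pvChars, List.flatMap_cons]
    exact List.sublist_append_right _ _
  | cons₂ q h ih => simpa [pvChars, List.flatMap_cons] using ih.append_left [q.1, q.2]

theorem pvFullPairs_nodup : (pvChars pvFullPairs).Nodup := by decide

theorem pvMkPairs_nodup (s : List Char) : (pvChars (pvMkPairs s)).Nodup :=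
  pvFullPairs_nodup.sublist (pvChars_sublist (pvMkPairs_sublist s))

theorem pvMkPairs_no_dot (s : List Char) : '.' ∉ pvChars (pvMkPairs s) := by
  intro h
  have : '.' ∈ pvChars pvFullPairs := (pvChars_sublist (pvMkPairs_sublist s)).subset h
  revert this; decide

theorem pvChars_length (ps : List (Char × Char)) : (pvChars ps).length = 2 * ps.length := by
  induction ps with
  | nil => rfl
  | cons p ps ih => simp [pvChars] at ih ⊢; omega

theorem pvChars_getElem_fst (ps : List (Char × Char)) (t : Nat) (ht : t < ps.length) :
    (pvChars ps)[2 * t]'(by rw [pvChars_length]; omega) = ps[t].1 := by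
  induction ps generalizing t with
  | nil => simp at ht
  | cons p ps ih =>
    cases t with
    | zero => rfl
    | succ t =>
      have := ih t (by simpa using ht)
      simpa [pvChars, List.getElem_cons, show 2 * (t + 1) = 2 * t + 1 + 1 by omega] using this

theorem pvChars_getElem_snd (ps : List (Char × Char)) (t : Nat) (ht : t < ps.length) :
    (pvChars ps)[2 * t + 1]'(by rw [pvChars_length]; omega) = ps[t].2 := by
  induction ps generalizing t with
  | nil => simp at ht
  | cons p ps ih =>
    cases t with
    | zero => rfl
    | succ t =>
      have := ih t (by simpa using ht)
      simpa [pvChars, List.getElem_cons, show 2 * (t + 1) + 1 = 2 * t + 1 + 1 + 1 by omega] using this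

theorem pvNe (ps : List (Char × Char)) (hnd : (pvChars ps).Nodup) (t t' : Nat)
    (ht : t < ps.length) (ht' : t' < ps.length) :
    (t ≠ t' → ps[t].1 ≠ ps[t'].1 ∧ ps[t].1 ≠ ps[t'].2 ∧ ps[t].2 ≠ ps[t'].1 ∧ ps[t].2 ≠ ps[t'].2)
      ∧ ps[t].1 ≠ ps[t].2 := by
  have g1 := pvChars_getElem_fst ps t ht
  have g2 := pvChars_getElem_snd ps t ht
  have g3 := pvChars_getElem_fst ps t' ht'
  have g4 := pvChars_getElem_snd ps t' ht'
  refine ⟨fun hne => ⟨?_, ?_, ?_, ?_⟩, ?_⟩ <;> intro he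
  · have := (List.Nodup.getElem_inj_iff hnd).mp (g1.trans (he.trans g3.symm)); omega
  · have := (List.Nodup.getElem_inj_iff hnd).mp (g1.trans (he.trans g4.symm)); omega
  · have := (List.Nodup.getElem_inj_iff hnd).mp (g2.trans (he.trans g3.symm)); omega
  · have := (List.Nodup.getElem_inj_iff hnd).mp (g2.trans (he.trans g4.symm)); omega
  · have := (List.Nodup.getElem_inj_iff hnd).mp (g1.trans (he.trans g2.symm)); omega

theorem mem_pvChars (ps : List (Char × Char)) (c : Char) :
    c ∈ pvChars ps ↔ ∃ t : Nat, ∃ ht : t < ps.length, c = ps[t].1 ∨ c = ps[t].2 := by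
  simp only [pvChars, List.mem_flatMap]
  constructor
  · rintro ⟨p, hp, hc⟩
    rcases List.mem_iff_getElem.1 hp with ⟨t, ht, rfl⟩
    rcases List.mem_pair.1 hc with rfl | rfl
    · exact ⟨t, ht, Or.inl rfl⟩
    · exact ⟨t, ht, Or.inr rfl⟩
  · rintro ⟨t, ht, h | h⟩ <;> exact ⟨ps[t], List.getElem_mem ht, by simp [h]⟩

theorem pvKind_none (ps : List (Char × Char)) (s : Int) (d : PySem.Dict Char (Int × Bool))
    (c : Char) (hc : c ∉ pvChars ps) :
    ((PySem.List.enumerate ps s).foldl pvKindStep d).get? c = d.get? c := by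
  induction ps generalizing s d with
  | nil => rfl
  | cons p ps ih =>
    have h1 : c ≠ p.1 := fun h => hc (by simp [pvChars, h])
    have h2 : c ≠ p.2 := fun h => hc (by simp [pvChars, h])
    have hc' : c ∉ pvChars ps := fun h => hc (by simp [pvChars] at h ⊢; exact Or.inr (Or.inr h))
    rw [PySem.List.enumerate_cons, List.foldl_cons, ih _ _ hc']
    simp only [pvKindStep]
    rw [PySem.Dict.get?_insert_of_ne _ _ h2, PySem.Dict.get?_insert_of_ne _ _ h1]

theorem pvKind_get (ps : List (Char × Char)) (s : Int) (d : PySem.Dict Char (Int × Bool))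
    (hnd : (pvChars ps).Nodup) (t : Nat) (ht : t < ps.length) :
    ((PySem.List.enumerate ps s).foldl pvKindStep d).get? ps[t].1 = some (s + t, true) ∧
      ((PySem.List.enumerate ps s).foldl pvKindStep d).get? ps[t].2 = some (s + t, false) := by
  induction ps generalizing s d t with
  | nil => simp at ht
  | cons p ps ih =>
    have hchars : pvChars (p :: ps) = p.1 :: p.2 :: pvChars ps := by simp [pvChars]
    rw [hchars] at hnd
    have hnd' : (pvChars ps).Nodup := (hnd.of_cons).of_cons
    rw [PySem.List.enumerate_cons, List.foldl_cons]
    cases t with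
    | zero =>
      have h1 : p.1 ∉ pvChars ps := fun h => (List.nodup_cons.1 hnd).1 (by simp [h])
      have h2 : p.2 ∉ pvChars ps := (List.nodup_cons.1 (List.nodup_cons.1 hnd).2).1
      have h12 : p.1 ≠ p.2 := fun h => (List.nodup_cons.1 hnd).1 (by simp [h])
      constructor
      · simp only [List.getElem_cons_zero]
        rw [pvKind_none ps _ _ _ h1]
        simp only [pvKindStep]
        rw [PySem.Dict.get?_insert_of_ne _ _ h12, PySem.Dict.get?_insert_self]
        simp
      · simp only [List.getElem_cons_zero]
        rw [pvKind_none ps _ _ _ h2]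
        simp only [pvKindStep]
        rw [PySem.Dict.get?_insert_self]
        simp
    | succ t =>
      have := ih (s + 1) (pvKindStep d (s, p)) hnd' t (by simpa using ht)
      have harith : s + 1 + (t : Int) = s + ((t : Nat) + 1 : Nat) := by push_cast; ring
      simpa [List.getElem_cons_succ, harith] using this

theorem take_succ_enum (sl : List Char) (n : Nat) (hn : n < sl.length) :
    (PySem.List.enumerate sl).take (n + 1)
      = (PySem.List.enumerate sl).take n ++ [((n : Int), sl[n])] := by
  rw [List.take_add_one]
  have hlt : n < (PySem.List.enumerate sl).length := by
    rw [PySem.List.length_enumerate]; exact hn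
  rw [List.getElem?_eq_getElem hlt, PySem.List.getElem_enumerate]
  simp

theorem pvScanN_succ (sl : List Char) (n : Nat) (hn : n < sl.length) (p : Char × Char) :
    pvScanN sl (n + 1) p
      = (if sl[n] = p.1 then ((pvScanN sl n p).1 ++ [(n : Int)], (pvScanN sl n p).2)
         else if sl[n] = p.2 then
           if (pvScanN sl n p).1 = []
             then ((pvScanN sl n p).1, (pvScanN sl n p).2 ++ [(n : Int)])
             else ((pvScanN sl n p).1.dropLast, (pvScanN sl n p).2)
         else pvScanN sl n p) := by
  rw [pvScanN, take_succ_enum sl n hn, pvScan_append]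
  simp [pvScan, pvScanN]

theorem B_scan (sl : List Char) (pairs : List (Char × Char))
    (hnd : (pvChars pairs).Nodup) (n : Nat) (hn : n ≤ sl.length) :
    ∃ mn : List Char,
      ((PySem.List.enumerate sl).take n).foldl
          (pvStepB ((PySem.List.enumerate pairs).foldl pvKindStep PySem.Dict.empty))
          (pairs.map (fun _ => []), pairs.map (fun _ => []), sl)
        = (pairs.map (fun p => (pvScanN sl n p).1), pairs.map (fun p => (pvScanN sl n p).2), mn)
      ∧ mn.length = sl.length
      ∧ ∀ j : Nat, ∀ hj : j < sl.length,
          mn[j]? = some (if ∃ p ∈ pairs, (j : Int) ∈ (pvScanN sl n p).2 then '.' else sl[j]) := by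
  induction n with
  | zero =>
    refine ⟨sl, rfl, rfl, fun j hj => ?_⟩
    have : ¬ ∃ p ∈ pairs, (j : Int) ∈ (pvScanN sl 0 p).2 := by
      rintro ⟨p, hp, hm⟩
      simp [pvScanN, pvScan] at hm
    simp [this, List.getElem?_eq_getElem hj]
  | succ n ih =>
    have hn' : n < sl.length := by omega
    obtain ⟨mn, heq, hlen, hpt⟩ := ih (by omega)
    rw [take_succ_enum sl n hn', List.foldl_append, heq]
    simp only [List.foldl_cons, List.foldl_nil]
    set K := (PySem.List.enumerate pairs).foldl pvKindStep PySem.Dict.empty with hK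
    by_cases hc : sl[n] ∈ pvChars pairs
    · rcases (mem_pvChars pairs sl[n]).1 hc with ⟨t, ht, hct⟩
      have hmapl : ∀ f : (Char × Char) → List Int, (pairs.map f).length = pairs.length := by
        intro f; simp
      have hgetf : ∀ f : (Char × Char) → List Int,
          PySem.List.pyGetD (pairs.map f) (t : Int) [] = f pairs[t] := by
        intro f
        rw [pyGetD_nat _ _ _ (by rw [hmapl]; exact ht)]
        simp
      rcases hct with hopen | hclose
      · -- sl[n] is the open bracket of type t
        have hkt := (pvKind_get pairs 0 PySem.Dict.empty hnd t ht).1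
        rw [← hK, ← hopen] at hkt
        have hget : K.get? sl[n] = some ((t : Int), true) := by simpa using hkt
        have hdiff : ∀ u, ∀ hu : u < pairs.length, u ≠ t →
            pvScanN sl (n + 1) pairs[u] = pvScanN sl n pairs[u] := by
          intro u hu hut
          have hne := (pvNe pairs hnd t u ht hu).1 (fun h => hut h.symm)
          rw [pvScanN_succ sl n hn', if_neg (fun h => hne.1 (hopen.symm.trans h)),
            if_neg (fun h => hne.2.1 (hopen.symm.trans h))]
        have htt : pvScanN sl (n + 1) pairs[t]
            = ((pvScanN sl n pairs[t]).1 ++ [(n : Int)], (pvScanN sl n pairs[t]).2) := by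
          rw [pvScanN_succ sl n hn', if_pos hopen]
        refine ⟨mn, ?_, hlen, ?_⟩
        · simp only [pvStepB, hget]
          rw [if_pos trivial, hgetf, pySetD_nat _ _ _ (by simp [ht])]
          refine congrArg₂ _ ?_ (congrArg₂ _ ?_ rfl)
          · apply List.ext_getElem (by simp)
            intro u hu1 hu2
            rw [List.getElem_set]
            simp only [List.getElem_map]
            by_cases hut : u = t
            · subst hut
              rw [if_pos rfl, htt]
            · rw [if_neg (fun h => hut h.symm),
                  hdiff u (by simpa using hu2) hut]
          · apply List.map_congr_left
            intro p hp
            rcases List.mem_iff_getElem.1 hp with ⟨u, hu, rfl⟩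
            by_cases hut : u = t
            · subst hut; rw [htt]
            · rw [hdiff u hu hut]
        · intro j hj
          rw [hpt j hj]
          have hcond : (∃ p ∈ pairs, (j : Int) ∈ (pvScanN sl (n + 1) p).2)
              ↔ (∃ p ∈ pairs, (j : Int) ∈ (pvScanN sl n p).2) := by
            refine ⟨?_, ?_⟩ <;> rintro ⟨p, hp, hm⟩ <;> refine ⟨p, hp, ?_⟩ <;>
                rcases List.mem_iff_getElem.1 hp with ⟨u, hu, rfl⟩ <;>
                by_cases hut : u = t <;>
                first
                  | (subst hut; rwa [htt] at hm)
                  | (rwa [hdiff u hu hut] at hm)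
                  | (subst hut; rw [htt]; exact hm)
                  | (rwa [hdiff u hu hut])
          by_cases h : ∃ p ∈ pairs, (j : Int) ∈ (pvScanN sl n p).2
          · rw [if_pos h, if_pos (hcond.2 h)]
          · rw [if_neg h, if_neg (fun hx => h (hcond.1 hx))]
      · -- sl[n] is the close bracket of type t
        have hkt := (pvKind_get pairs 0 PySem.Dict.empty hnd t ht).2
        rw [← hK, ← hclose] at hkt
        have hget : K.get? sl[n] = some ((t : Int), false) := by simpa using hkt
        have hdiff : ∀ u, ∀ hu : u < pairs.length, u ≠ t →
            pvScanN sl (n + 1) pairs[u] = pvScanN sl n pairs[u] := by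
          intro u hu hut
          have hne := (pvNe pairs hnd t u ht hu).1 (fun h => hut h.symm)
          rw [pvScanN_succ sl n hn', if_neg (fun h => hne.2.2.1 (hclose.symm.trans h)),
            if_neg (fun h => hne.2.2.2 (hclose.symm.trans h))]
        have hoc : sl[n] ≠ pairs[t].1 := fun h => (pvNe pairs hnd t t ht ht).2 (h.symm.trans hclose)
        by_cases hemp : (pvScanN sl n pairs[t]).1 = []
        · -- unmatched close: record the repair and dot the character
          have htt : pvScanN sl (n + 1) pairs[t]
              = ((pvScanN sl n pairs[t]).1, (pvScanN sl n pairs[t]).2 ++ [(n : Int)]) := by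
            rw [pvScanN_succ sl n hn', if_neg hoc, if_pos hclose, if_pos hemp]
          refine ⟨PySem.List.pySetD mn (n : Int) '.', ?_, by rw [pySetD_nat _ _ _ (by omega)]; simp [hlen], ?_⟩
          · simp only [pvStepB, hget]
            rw [if_neg Bool.false_ne_true, hgetf, if_neg (by simp [hemp]), hgetf,
              pySetD_nat _ _ _ (by simp [ht])]
            refine congrArg₂ _ ?_ (congrArg₂ _ ?_ rfl)
            · apply List.map_congr_left
              intro p hp
              rcases List.mem_iff_getElem.1 hp with ⟨u, hu, rfl⟩
              by_cases hut : u = t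
              · subst hut; rw [htt]
              · rw [hdiff u hu hut]
            · apply List.ext_getElem (by simp)
              intro u hu1 hu2
              rw [List.getElem_set]
              simp only [List.getElem_map]
              by_cases hut : u = t
              · subst hut; rw [if_pos rfl, htt]
              · rw [if_neg (fun h => hut h.symm),
                  hdiff u (by simpa using hu2) hut]
          · intro j hj
            rw [pySetD_nat _ _ _ (by omega), List.getElem?_set]
            by_cases hjn : j = n
            · subst hjn
              have : ∃ p ∈ pairs, (j : Int) ∈ (pvScanN sl (j + 1) p).2 := by
                refine ⟨pairs[t], List.getElem_mem ht, ?_⟩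
                rw [htt]; simp
              simp [this, hlen, hj]
            · rw [if_neg (fun h => hjn h.symm), hpt j hj]
              have hcond : (∃ p ∈ pairs, (j : Int) ∈ (pvScanN sl (n + 1) p).2)
                  ↔ (∃ p ∈ pairs, (j : Int) ∈ (pvScanN sl n p).2) := by
                constructor <;> rintro ⟨p, hp, hm⟩ <;> refine ⟨p, hp, ?_⟩ <;>
                  rcases List.mem_iff_getElem.1 hp with ⟨u, hu, rfl⟩ <;>
                  by_cases hut : u = t
                · subst hut
                  rw [htt] at hm
                  rcases List.mem_append.1 hm with hm | hm
                  · exact hm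
                  · exfalso; simp at hm; omega
                · rwa [hdiff u hu hut] at hm
                · subst hut; rw [htt]; exact List.mem_append_left _ hm
                · rwa [hdiff u hu hut]
              by_cases h : ∃ p ∈ pairs, (j : Int) ∈ (pvScanN sl n p).2
              · rw [if_pos h, if_pos (hcond.2 h)]
              · rw [if_neg h, if_neg (fun hx => h (hcond.1 hx))]
        · -- matched close: pop
          have htt : pvScanN sl (n + 1) pairs[t]
              = ((pvScanN sl n pairs[t]).1.dropLast, (pvScanN sl n pairs[t]).2) := by
            rw [pvScanN_succ sl n hn', if_neg hoc, if_pos hclose, if_neg hemp]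
          refine ⟨mn, ?_, hlen, ?_⟩
          · simp only [pvStepB, hget]
            rw [if_neg Bool.false_ne_true, hgetf, if_pos (by simp [hemp]),
              pySetD_nat _ _ _ (by simp [ht])]
            refine congrArg₂ _ ?_ (congrArg₂ _ ?_ rfl)
            · apply List.ext_getElem (by simp)
              intro u hu1 hu2
              rw [List.getElem_set]
              simp only [List.getElem_map]
              by_cases hut : u = t
              · subst hut; rw [if_pos rfl, htt]
              · rw [if_neg (fun h => hut h.symm),
                  hdiff u (by simpa using hu2) hut]
            · apply List.map_congr_left
              intro p hp
              rcases List.mem_iff_getElem.1 hp with ⟨u, hu, rfl⟩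
              by_cases hut : u = t
              · subst hut; rw [htt]
              · rw [hdiff u hu hut]
          · intro j hj
            rw [hpt j hj]
            have hcond : (∃ p ∈ pairs, (j : Int) ∈ (pvScanN sl (n + 1) p).2)
                ↔ (∃ p ∈ pairs, (j : Int) ∈ (pvScanN sl n p).2) := by
              refine ⟨?_, ?_⟩ <;> rintro ⟨p, hp, hm⟩ <;> refine ⟨p, hp, ?_⟩ <;>
                  rcases List.mem_iff_getElem.1 hp with ⟨u, hu, rfl⟩ <;>
                  by_cases hut : u = t <;>
                  first
                    | (subst hut; rwa [htt] at hm)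
                    | (rwa [hdiff u hu hut] at hm)
                    | (subst hut; rw [htt]; exact hm)
                    | (rwa [hdiff u hu hut])
            by_cases h : ∃ p ∈ pairs, (j : Int) ∈ (pvScanN sl n p).2
            · rw [if_pos h, if_pos (hcond.2 h)]
            · rw [if_neg h, if_neg (fun hx => h (hcond.1 hx))]
    · have hget : K.get? sl[n] = none := by
        rw [hK, pvKind_none pairs 0 PySem.Dict.empty _ hc]
        simp [PySem.Dict.get?_empty]
      have hstep : pvStepB K (pairs.map (fun p => (pvScanN sl n p).1),
          pairs.map (fun p => (pvScanN sl n p).2), mn) ((n : Int), sl[n])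
          = (pairs.map (fun p => (pvScanN sl n p).1), pairs.map (fun p => (pvScanN sl n p).2), mn) := by
        simp [pvStepB, hget]
      have hsame : ∀ p ∈ pairs, pvScanN sl (n + 1) p = pvScanN sl n p := by
        intro p hp
        have h1 : sl[n] ≠ p.1 := fun h => hc ((mem_pvChars pairs sl[n]).2 (by
          rcases List.mem_iff_getElem.1 hp with ⟨u, hu, rfl⟩; exact ⟨u, hu, Or.inl h⟩))
        have h2 : sl[n] ≠ p.2 := fun h => hc ((mem_pvChars pairs sl[n]).2 (by
          rcases List.mem_iff_getElem.1 hp with ⟨u, hu, rfl⟩; exact ⟨u, hu, Or.inr h⟩))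
        rw [pvScanN_succ sl n hn' p, if_neg h1, if_neg h2]
      refine ⟨mn, ?_, hlen, ?_⟩
      · rw [hstep]
        congr 1
        · exact (List.map_congr_left (fun p hp => by rw [hsame p hp])).symm
        · congr 1
          exact (List.map_congr_left (fun p hp => by rw [hsame p hp])).symm
      · intro j hj
        rw [hpt j hj]
        have hcond : (∃ p ∈ pairs, (j : Int) ∈ (pvScanN sl (n + 1) p).2)
            ↔ (∃ p ∈ pairs, (j : Int) ∈ (pvScanN sl n p).2) := by
          constructor <;> rintro ⟨p, hp, hm⟩ <;> exact ⟨p, hp, by first | rwa [hsame p hp] at hm | rwa [hsame p hp]⟩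
        by_cases h : ∃ p ∈ pairs, (j : Int) ∈ (pvScanN sl n p).2
        · rw [if_pos h, if_pos (hcond.2 h)]
        · rw [if_neg h, if_neg (fun hx => h (hcond.1 hx))]

theorem B_asm (L : List ((Char × Char) × List Int × List Int)) (m : List Char)
    (rs : List String) :
    L.foldl pvAsmB (m, rs)
      = (L.foldl (fun mm e => e.2.1.foldl pvDot mm) m,
         rs ++ L.flatMap (fun e => e.2.2.map (fun i => pvMsgClose i e.1.1 e.1.2)
           ++ e.2.1.map (fun i => pvMsgOpen i e.1.1 e.1.2))) := by
  induction L generalizing m rs with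
  | nil => simp
  | cons e L ih =>
    rw [List.foldl_cons]
    have h1 : pvAsmB (m, rs) e
        = (e.2.1.foldl pvDot m, rs ++ (e.2.2.map (fun i => pvMsgClose i e.1.1 e.1.2)
            ++ e.2.1.map (fun i => pvMsgOpen i e.1.1 e.1.2))) := by
      unfold pvAsmB
      rw [PySem.List.foldl_prod_mk (f := fun (a : List Char) (_ : Int) => a)
        (g := fun r i => r ++ [pvMsgClose i e.1.1 e.1.2])]
      rw [PySem.List.foldl_ignore, PySem.List.foldl_append_singleton_eq_map]
      rw [PySem.List.foldl_prod_mk (f := fun (a : List Char) (i : Int) => PySem.List.pySetD a i '.')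
        (g := fun r i => r ++ [pvMsgOpen i e.1.1 e.1.2])]
      rw [PySem.List.foldl_append_singleton_eq_map]
      simp [List.append_assoc]
      rfl
    rw [h1, ih]
    simp [List.flatMap_cons]

theorem zip_map3 {α β : Type} (L : List α) (f g : α → List β) :
    L.zip ((L.map f).zip (L.map g)) = L.map (fun x => (x, f x, g x)) := by
  induction L with
  | nil => rfl
  | cons x L ih => simp [ih]

theorem foldl_pass_spec (posf : (Char × Char) → List Int) (L : List (Char × Char))
    (m : List Char)
    (hv : ∀ p ∈ L, ∀ i ∈ posf p, 0 ≤ i ∧ i < (m.length : Int)) :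
    ((L.foldl (fun mm p => (posf p).foldl pvDot mm) m).length = m.length) ∧
      ∀ j : Nat, ∀ hj : j < m.length,
        (L.foldl (fun mm p => (posf p).foldl pvDot mm) m)[j]?
          = some (if ∃ p ∈ L, (j : Int) ∈ posf p then '.' else m[j]) := by
  induction L generalizing m with
  | nil => refine ⟨rfl, fun j hj => ?_⟩; simp [List.getElem?_eq_getElem hj]
  | cons p L ih =>
    obtain ⟨hl1, hp1⟩ := foldl_pvDot_spec (posf p) m (hv p List.mem_cons_self)
    have hv' : ∀ q ∈ L, ∀ i ∈ posf q, 0 ≤ i ∧ i < (((posf p).foldl pvDot m).length : Int) := by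
      intro q hq i hi; rw [hl1]; exact hv q (List.mem_cons_of_mem _ hq) i hi
    obtain ⟨hl2, hp2⟩ := ih ((posf p).foldl pvDot m) hv'
    rw [List.foldl_cons]
    refine ⟨by rw [hl2, hl1], fun j hj => ?_⟩
    rw [hp2 j (by omega)]
    have := hp1 j hj
    rw [List.getElem?_eq_getElem (by omega : j < ((posf p).foldl pvDot m).length)] at this
    have hval := Option.some.inj this
    by_cases hL : ∃ q ∈ L, (j : Int) ∈ posf q
    · simp [hL]
    · by_cases hpp : (j : Int) ∈ posf p
      · simp [hL, hpp, hval]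
      · have : ¬ ∃ q ∈ p :: L, (j : Int) ∈ posf q := by
          rintro ⟨q, hq, hm⟩
          rcases List.mem_cons.1 hq with rfl | hq'
          · exact hpp hm
          · exact hL ⟨q, hq', hm⟩
        simp [hL, hpp, hval]

-- ===== VERDICT (by name: the statement is the Claim_ definition above) =====
theorem repair_secondary_structure_spec : Claim_equal_repair_secondary_structure := by
  intro s _hdom
  unfold Spec_repair_secondary_structure
  have hnd := pvMkPairs_nodup s.toList
  have hdot := pvMkPairs_no_dot s.toList
  set sl := s.toList with hsl
  set pairs := pvMkPairs sl with hpairs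
  -- A's value
  have hA : repair_secondary_structure s
      = (String.ofList (pairs.foldl
          (fun mm q => (pvStk sl q).foldl pvDot ((pvCls sl q).foldl pvDot mm)) sl),
         pairs.flatMap (pvMsgs sl)) := by
    unfold repair_secondary_structure
    rw [pvFoldA_eq sl pairs sl [] [] rfl (fun j hj hj' => Or.inl rfl) (by simp) hnd hdot]
    simp
  -- B's scan phase
  have htake : (PySem.List.enumerate sl).take sl.length = PySem.List.enumerate sl := by
    rw [← PySem.List.length_enumerate sl 0]; exact List.take_length
  have hfull : ∀ p : Char × Char, pvScanN sl sl.length p = (pvStk sl p, pvCls sl p) := by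
    intro p; unfold pvScanN pvStk pvCls; rw [htake]
  obtain ⟨mN, heq, hlenN, hptN⟩ := B_scan sl pairs hnd sl.length (le_refl _)
  rw [htake] at heq
  have hm1 : pairs.map (fun p => (pvScanN sl sl.length p).1) = pairs.map (fun p => pvStk sl p) :=
    List.map_congr_left (fun p _ => by rw [hfull p])
  have hm2 : pairs.map (fun p => (pvScanN sl sl.length p).2) = pairs.map (fun p => pvCls sl p) :=
    List.map_congr_left (fun p _ => by rw [hfull p])
  rw [hm1, hm2] at heq
  -- B's value
  have hB : repair_secondary_structure_alt s
      = (String.ofList (pairs.foldl (fun mm q => (pvStk sl q).foldl pvDot mm) mN),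
         pairs.flatMap (pvMsgs sl)) := by
    simp only [repair_secondary_structure_alt]
    rw [heq, zip_map3, B_asm, List.foldl_map, List.flatMap_map]
    rfl
  rw [hA, hB]
  -- the two repaired character lists agree pointwise
  have hvA : ∀ p ∈ pairs, ∀ i ∈ pvCls sl p ++ pvStk sl p, 0 ≤ i ∧ i < (sl.length : Int) := by
    intro p hp i hi
    rcases List.mem_append.1 hi with h | h
    · rcases pvCls_spec sl p i h with ⟨k, hk, rfl, _⟩; constructor <;> omega
    · rcases pvStk_spec sl p i h with ⟨k, hk, rfl, _⟩; constructor <;> omega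
  have hvB : ∀ p ∈ pairs, ∀ i ∈ pvStk sl p, 0 ≤ i ∧ i < (mN.length : Int) := by
    intro p hp i hi
    rcases pvStk_spec sl p i hi with ⟨k, hk, rfl, _⟩; rw [hlenN]; constructor <;> omega
  obtain ⟨hlA, hpA⟩ := foldl_pass_spec (fun q => pvCls sl q ++ pvStk sl q) pairs sl hvA
  obtain ⟨hlB, hpB⟩ := foldl_pass_spec (fun q => pvStk sl q) pairs mN hvB
  have hstepA : pairs.foldl (fun mm q => (pvStk sl q).foldl pvDot ((pvCls sl q).foldl pvDot mm)) sl
      = pairs.foldl (fun mm q => (pvCls sl q ++ pvStk sl q).foldl pvDot mm) sl := by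
    apply PySem.List.foldl_congr_mem
    intro acc q hq
    rw [List.foldl_append]
  have hceq : pairs.foldl (fun mm q => (pvStk sl q).foldl pvDot ((pvCls sl q).foldl pvDot mm)) sl
      = pairs.foldl (fun mm q => (pvStk sl q).foldl pvDot mm) mN := by
    rw [hstepA]
    apply List.ext_getElem (by rw [hlA, hlB, hlenN])
    intro j hj1 hj2
    have hjs : j < sl.length := by rw [hlA] at hj1; exact hj1
    have hjm : j < mN.length := by rw [hlenN]; exact hjs
    have e1 := hpA j hjs
    rw [List.getElem?_eq_getElem hj1] at e1
    have e1' := Option.some.inj e1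
    have e2 := hpB j hjm
    rw [List.getElem?_eq_getElem hj2] at e2
    have e2' := Option.some.inj e2
    have e3 := hptN j hjs
    rw [List.getElem?_eq_getElem hjm] at e3
    have e3' := Option.some.inj e3
    have hcnd : (∃ p ∈ pairs, (j : Int) ∈ (pvScanN sl sl.length p).2)
        ↔ (∃ p ∈ pairs, (j : Int) ∈ pvCls sl p) := by
      refine ⟨?_, ?_⟩ <;> rintro ⟨p, hp, hm⟩ <;> refine ⟨p, hp, ?_⟩
      · rw [hfull p] at hm; exact hm
      · rw [hfull p]; exact hm
    rw [e1', e2', e3']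
    by_cases hs : ∃ p ∈ pairs, (j : Int) ∈ pvStk sl p
    · rcases hs with ⟨p, hp, hm⟩
      have h1 : ∃ p ∈ pairs, (j : Int) ∈ pvCls sl p ++ pvStk sl p :=
        ⟨p, hp, List.mem_append_right _ hm⟩
      rw [if_pos h1, if_pos ⟨p, hp, hm⟩]
    · rw [if_neg hs]
      by_cases hc : ∃ p ∈ pairs, (j : Int) ∈ pvCls sl p
      · rcases hc with ⟨p, hp, hm⟩
        have h1 : ∃ p ∈ pairs, (j : Int) ∈ pvCls sl p ++ pvStk sl p :=
          ⟨p, hp, List.mem_append_left _ hm⟩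
        rw [if_pos h1, if_pos (hcnd.2 ⟨p, hp, hm⟩)]
      · have h1 : ¬ ∃ p ∈ pairs, (j : Int) ∈ pvCls sl p ++ pvStk sl p := by
          rintro ⟨p, hp, hm⟩
          rcases List.mem_append.1 hm with h | h
          · exact hc ⟨p, hp, h⟩
          · exact hs ⟨p, hp, h⟩
        rw [if_neg h1, if_neg (fun hx => hc (hcnd.1 hx))]
  rw [hceq]
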